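-- pv_equiv track=rewrite | github.com/fcarrascop/INF245-Lab1 | convertion/hexadecimal.py | dividir_octal_por_20
-- ===== SOURCE A (Python) =====
-- def dividir_octal_por_20(numero_octal):
--     cociente = ""
--     resto = 0
--
--     for digito in numero_octal:
--         # convertir carácter a número (sin usar int)
--         valor = int(digito)
--
--         # acumulación en base 8 (simula la división larga)
--         acumulado = resto * 8 + valor
--
--         # dividir entre 20₈ (equivale a 16)
--         digito_cociente = acumulado // 16
--         resto = acumulado % 16
--
--         # evitar ceros a la izquierda
--         if cociente != "" or digito_cociente != 0:
--             cociente += chr(digito_cociente + ord('0'))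
--
--     if cociente == "":
--         cociente = "0"
--
--     return cociente, resto
-- ===== SOURCE B (Python) =====
-- def dividir_octal_por_20(numero_octal):
--     # The running remainder of A's long division after a prefix depends only on
--     # the prefix's last two digits, so each quotient digit (and the final rest)
--     # is a pure function of a 3-digit sliding window: no loop-carried state.
--     ds = [int(c) for c in numero_octal]
--     ext = [0, 0] + ds
--     qs = [(8 * ((8 * a + b) % 16) + c - (8 * b + c) % 16) // 16
--           for a, b, c in zip(ext, ext[1:], ds)]
--     cociente = ''.join(chr(48 + q) for q in qs).lstrip('0') or '0'
--     resto = (8 * ext[-2] + ext[-1]) % 16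
--     return cociente, resto
-- ===== Notes on version B (the rewrite author's own statement) =====
-- stated objective: alternative
-- what changed: Replaces A's stateful long division (running remainder plus conditional quotient append) by a stateless map: since the running remainder depends only on the last two digits, each quotient digit and the final remainder are pure functions of a 3-digit sliding window, mapped over the string, joined and left-stripped.
import Mathlib
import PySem

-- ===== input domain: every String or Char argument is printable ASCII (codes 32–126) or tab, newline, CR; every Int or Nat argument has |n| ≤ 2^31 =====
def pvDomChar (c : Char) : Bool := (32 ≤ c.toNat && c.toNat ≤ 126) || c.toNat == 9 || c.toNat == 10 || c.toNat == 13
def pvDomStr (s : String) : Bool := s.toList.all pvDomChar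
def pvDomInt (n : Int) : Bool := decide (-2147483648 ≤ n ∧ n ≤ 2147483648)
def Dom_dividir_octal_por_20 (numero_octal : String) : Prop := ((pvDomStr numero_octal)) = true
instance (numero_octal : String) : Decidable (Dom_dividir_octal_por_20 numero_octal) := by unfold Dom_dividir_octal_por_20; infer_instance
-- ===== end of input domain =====

-- B replaces A's stateful long division by a stateless 3-digit sliding-window map (alternative decomposition, same cost).

-- ===== PORT A =====
-- one loop iteration of A: state is (cociente, resto)
def pvStepA (st : String × Int) (digito : Char) : String × Int :=
  let valor : Int := (PySem.Int.ofChars? [digito]).getD 0  -- int(digito); none = ValueError, excluded by Pre_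
  let acumulado : Int := st.2 * 8 + valor
  let digito_cociente : Int := PySem.Int.floordiv acumulado 16
  let resto : Int := PySem.Int.mod acumulado 16
  -- chr(digito_cociente + ord('0')): exact for the codes 48..56 reached under Pre_
  let cociente : String :=
    if st.1 ≠ "" ∨ digito_cociente ≠ 0 then st.1.push (Char.ofNat (digito_cociente + 48).toNat) else st.1
  (cociente, resto)

def dividir_octal_por_20 (numero_octal : String) : String × Int :=
  let st := numero_octal.toList.foldl pvStepA ("", 0)
  let cociente := if st.1 = "" then "0" else st.1
  (cociente, st.2)

-- ===== PORT B =====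
-- quotient digit from the 3-digit window (a, b, c)
def pvWindowQ (a b c : Int) : Int :=
  PySem.Int.floordiv (8 * PySem.Int.mod (8 * a + b) 16 + c - PySem.Int.mod (8 * b + c) 16) 16

def dividir_octal_por_20_alt (numero_octal : String) : String × Int :=
  let ds := numero_octal.toList.map (fun c => (PySem.Int.ofChars? [c]).getD 0)  -- [int(c) for c in numero_octal]
  let ext := [0, 0] ++ ds
  let qs := (ext.zip ((PySem.List.slice ext (some 1) none).zip ds)).map
      (fun w => pvWindowQ w.1 w.2.1 w.2.2)
  let joined := String.ofList (qs.map (fun q => Char.ofNat (48 + q).toNat))  -- ''.join(chr(48 + q) …)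
  let stripped := String.ofList (joined.toList.dropWhile (fun c => c == '0'))  -- .lstrip('0'): hand port, exact (drops leading '0's)
  let cociente := if stripped = "" then "0" else stripped  -- … or '0'
  let resto := PySem.Int.mod (8 * (PySem.List.pyGet? ext (-2)).getD 0 + (PySem.List.pyGet? ext (-1)).getD 0) 16
  (cociente, resto)

-- ===== PRECONDITION & SPEC =====
-- Pre_ excludes exactly the inputs where A raises: int(digito) raises ValueError on any non-digit character.
def Pre_dividir_octal_por_20 (numero_octal : String) : Prop :=
  numero_octal = "" ∨ PySem.Str.strIsdigit numero_octal = true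
instance (numero_octal : String) : Decidable (Pre_dividir_octal_por_20 numero_octal) := by
  unfold Pre_dividir_octal_por_20; infer_instance

def pvWitness_dividir_octal_por_20 : String := "170"

def Spec_dividir_octal_por_20 (numero_octal : String) (out : String × Int) : Prop := out = dividir_octal_por_20_alt numero_octal
instance (numero_octal : String) (out : String × Int) : Decidable (Spec_dividir_octal_por_20 numero_octal out) := by unfold Spec_dividir_octal_por_20; infer_instance

-- ===== CLAIM (what is proved, stated in full; the proofs are below) =====
def Claim_equal_dividir_octal_por_20 : Prop := ∀ (numero_octal : String), Dom_dividir_octal_por_20 numero_octal → Pre_dividir_octal_por_20 numero_octal → Spec_dividir_octal_por_20 numero_octal (dividir_octal_por_20 numero_octal)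

-- ===== LEMMAS AND PROOFS =====

-- A's loop step on the digit VALUE (pvStepA with int(digito) factored out)
def pvStepA' (st : String × Int) (d : Int) : String × Int :=
  let acumulado : Int := st.2 * 8 + d
  let digito_cociente : Int := PySem.Int.floordiv acumulado 16
  let resto : Int := PySem.Int.mod acumulado 16
  let cociente : String :=
    if st.1 ≠ "" ∨ digito_cociente ≠ 0 then st.1.push (Char.ofNat (digito_cociente + 48).toNat) else st.1
  (cociente, resto)

-- A's conditional quotient append, on quotient digits
def pvPush (s : String) (q : Int) : String :=
  if s ≠ "" ∨ q ≠ 0 then s.push (Char.ofNat (q + 48).toNat) else s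

-- the window-mapped quotient digits, recursively
def pvQs (a b : Int) : List Int → List Int
  | [] => []
  | d :: ds => pvWindowQ a b d :: pvQs b d ds

-- the final remainder, recursively
def pvLastR (a b : Int) : List Int → Int
  | [] => PySem.Int.mod (8 * a + b) 16
  | d :: ds => pvLastR b d ds

lemma pv_digit_cases (c : Char) (h : PySem.Chars.isdigit c = true) :
    c = '0' ∨ c = '1' ∨ c = '2' ∨ c = '3' ∨ c = '4' ∨ c = '5' ∨ c = '6' ∨ c = '7' ∨ c = '8' ∨ c = '9' := by
  simp [PySem.Chars.isdigit] at h
  obtain ⟨h1, h2⟩ := h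
  rw [Char.le_def] at h1 h2
  have hb1 : 48 ≤ c.toNat := h1
  have hb2 : c.toNat ≤ 57 := h2
  have hc : Char.ofNat c.toNat = c := Char.ofNat_toNat c
  interval_cases h : c.toNat <;> rw [← hc] <;> decide

lemma pv_pre_digits (s : String) (h : Pre_dividir_octal_por_20 s) :
    ∀ c ∈ s.toList, PySem.Chars.isdigit c = true := by
  rcases h with h | h
  · subst h; simp
  · simp [PySem.Str.strIsdigit, PySem.Chars.strIsdigit, List.all_eq_true] at h
    exact h.2

lemma pv_dval_bounds (c : Char) (h : PySem.Chars.isdigit c = true) :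
    0 ≤ (PySem.Int.ofChars? [c]).getD 0 ∧ (PySem.Int.ofChars? [c]).getD 0 ≤ 9 := by
  rcases pv_digit_cases c h with h|h|h|h|h|h|h|h|h|h <;> subst h <;> decide

lemma pv_mod_step (a b d : Int) :
    PySem.Int.mod (PySem.Int.mod (8 * a + b) 16 * 8 + d) 16 = PySem.Int.mod (8 * b + d) 16 := by
  rw [PySem.Int.mod_eq_emod_of_pos (by norm_num : (0:Int) < 16),
      PySem.Int.mod_eq_emod_of_pos (by norm_num : (0:Int) < 16),
      PySem.Int.mod_eq_emod_of_pos (by norm_num : (0:Int) < 16)]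
  omega

lemma pv_div_step (a b d : Int) :
    PySem.Int.floordiv (PySem.Int.mod (8 * a + b) 16 * 8 + d) 16 = pvWindowQ a b d := by
  unfold pvWindowQ
  rw [PySem.Int.mod_eq_emod_of_pos (by norm_num : (0:Int) < 16),
      PySem.Int.mod_eq_emod_of_pos (by norm_num : (0:Int) < 16),
      PySem.Int.floordiv_eq_ediv_of_pos (by norm_num : (0:Int) < 16),
      PySem.Int.floordiv_eq_ediv_of_pos (by norm_num : (0:Int) < 16)]
  omega

lemma pv_foldA_spec (ds : List Int) : ∀ (a b : Int) (coc : String),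
    List.foldl pvStepA' (coc, PySem.Int.mod (8 * a + b) 16) ds
      = (List.foldl pvPush coc (pvQs a b ds), pvLastR a b ds) := by
  induction ds with
  | nil => intro a b coc; simp [pvQs, pvLastR]
  | cons d ds ih =>
    intro a b coc
    have hstep : pvStepA' (coc, PySem.Int.mod (8 * a + b) 16) d
        = (pvPush coc (pvWindowQ a b d), PySem.Int.mod (8 * b + d) 16) := by
      simp only [pvStepA', pvPush, pv_mod_step, pv_div_step]
    simp only [List.foldl_cons, hstep, pvQs, pvLastR, ih b d]

lemma pv_windowQ_bounds (a b d : Int) (hd : 0 ≤ d) (hd9 : d ≤ 9) :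
    0 ≤ pvWindowQ a b d ∧ pvWindowQ a b d ≤ 8 := by
  unfold pvWindowQ
  rw [PySem.Int.mod_eq_emod_of_pos (by norm_num : (0:Int) < 16),
      PySem.Int.mod_eq_emod_of_pos (by norm_num : (0:Int) < 16),
      PySem.Int.floordiv_eq_ediv_of_pos (by norm_num : (0:Int) < 16)]
  omega

lemma pv_qs_bounds (ds : List Int) : ∀ (a b : Int), (∀ d ∈ ds, 0 ≤ d ∧ d ≤ 9) →
    0 ≤ a → a ≤ 9 → 0 ≤ b → b ≤ 9 → ∀ q ∈ pvQs a b ds, 0 ≤ q ∧ q ≤ 8 := by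
  induction ds with
  | nil => intro a b _ _ _ _ _ q hq; simp [pvQs] at hq
  | cons d ds ih =>
    intro a b hds ha ha9 hb hb9 q hq
    have hd := hds d (by simp)
    rcases List.mem_cons.mp hq with h | h
    · exact h ▸ pv_windowQ_bounds a b d hd.1 hd.2
    · exact ih b d (fun x hx => hds x (by simp [hx])) hb hb9 hd.1 hd.2 q h

lemma pv_push_nonempty (qs : List Int) : ∀ (s : String), s.toList ≠ [] →
    (List.foldl pvPush s qs).toList = s.toList ++ qs.map (fun q => Char.ofNat (q + 48).toNat) := by
  induction qs with
  | nil => intro s _; simp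
  | cons q qs ih =>
    intro s hs
    have hne : s ≠ "" := by intro h; exact hs (by simp [h])
    have : pvPush s q = s.push (Char.ofNat (q + 48).toNat) := by simp [pvPush, hne]
    rw [List.foldl_cons, this, ih _ (by simp [String.toList_push])]
    simp [String.toList_push]

lemma pv_push_empty (qs : List Int) (hb : ∀ q ∈ qs, 0 ≤ q ∧ q ≤ 8) :
    (List.foldl pvPush "" qs).toList
      = ((qs.map (fun q => Char.ofNat (q + 48).toNat)).dropWhile (fun c => c == '0')) := by
  induction qs with
  | nil => simp
  | cons q qs ih =>
    have hq := hb q (by simp)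
    by_cases h0 : q = 0
    · subst h0
      have : pvPush "" 0 = "" := by simp [pvPush]
      rw [List.foldl_cons, this, ih (fun x hx => hb x (by simp [hx]))]
      simp
    · have hne : (Char.ofNat (q + 48).toNat == '0') = false := by
        have h1 := hq.1; have h2 := hq.2
        interval_cases q <;> simp_all
      have hp : pvPush "" q = ("".push (Char.ofNat (q + 48).toNat)) := by simp [pvPush, h0]
      rw [List.foldl_cons, hp,
          pv_push_nonempty qs ("".push (Char.ofNat (q + 48).toNat)) (by simp [String.toList_push])]
      simp [String.toList_push, hne]

lemma pv_zip_eq (ds : List Int) : ∀ (a b : Int),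
    (((a :: b :: ds).zip ((b :: ds).zip ds)).map (fun w => pvWindowQ w.1 w.2.1 w.2.2)) = pvQs a b ds := by
  induction ds with
  | nil => intro a b; simp [pvQs]
  | cons d ds ih => intro a b; simp only [List.zip_cons_cons, List.map_cons, pvQs, ih b d]

lemma pv_slice_tail (a b : Int) (ds : List Int) :
    PySem.List.slice ([a, b] ++ ds) (some 1) none = b :: ds := by
  simp [PySem.List.slice]

lemma pv_pyGet_step (a b d : Int) (ds : List Int) (i : Int) (h2 : i = -2 ∨ i = -1) :
    PySem.List.pyGet? ([a, b, d] ++ ds) i = PySem.List.pyGet? ([b, d] ++ ds) i := by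
  rcases h2 with h | h <;> subst h
  · simp [PySem.List.pyGet?, PySem.List.pyIdx?]
    rfl
  · simp [PySem.List.pyGet?, PySem.List.pyIdx?]
    rw [if_pos (by omega)]
    simp

lemma pv_lastR_eq (ds : List Int) : ∀ (a b : Int),
    PySem.Int.mod (8 * (PySem.List.pyGet? ([a, b] ++ ds) (-2)).getD 0
      + (PySem.List.pyGet? ([a, b] ++ ds) (-1)).getD 0) 16 = pvLastR a b ds := by
  induction ds with
  | nil =>
    intro a b
    simp [PySem.List.pyGet?, PySem.List.pyIdx?, pvLastR]
  | cons d ds ih =>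
    intro a b
    have e2 := pv_pyGet_step a b d ds (-2) (Or.inl rfl)
    have e1 := pv_pyGet_step a b d ds (-1) (Or.inr rfl)
    calc PySem.Int.mod (8 * (PySem.List.pyGet? ([a, b] ++ d :: ds) (-2)).getD 0
          + (PySem.List.pyGet? ([a, b] ++ d :: ds) (-1)).getD 0) 16
        = PySem.Int.mod (8 * (PySem.List.pyGet? ([b, d] ++ ds) (-2)).getD 0
          + (PySem.List.pyGet? ([b, d] ++ ds) (-1)).getD 0) 16 := by
          rw [show ([a, b] ++ d :: ds) = ([a, b, d] ++ ds) by simp, e2, e1]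
      _ = pvLastR b d ds := ih b d
      _ = pvLastR a b (d :: ds) := rfl

-- ===== VERDICT (by name: the statement is the Claim_ definition above) =====
theorem dividir_octal_por_20_spec : Claim_equal_dividir_octal_por_20 := by
  intro s _ hPre
  unfold Spec_dividir_octal_por_20 dividir_octal_por_20 dividir_octal_por_20_alt
  have hdig : ∀ d ∈ s.toList.map (fun c => (PySem.Int.ofChars? [c]).getD 0), 0 ≤ d ∧ d ≤ 9 := by
    intro d hd
    obtain ⟨c, hc, rfl⟩ := List.mem_map.mp hd
    exact pv_dval_bounds c (pv_pre_digits s hPre c hc)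
  set ds := s.toList.map (fun c => (PySem.Int.ofChars? [c]).getD 0) with hds
  have hqb : ∀ q ∈ pvQs 0 0 ds, 0 ≤ q ∧ q ≤ 8 :=
    pv_qs_bounds ds 0 0 hdig (by norm_num) (by norm_num) (by norm_num) (by norm_num)
  -- A's loop = pvPush-fold over the window quotient digits
  have h0 : (("" : String), (0 : Int)) = ("", PySem.Int.mod (8 * 0 + 0) 16) := by decide
  have hfold : s.toList.foldl pvStepA ("", 0)
      = (List.foldl pvPush "" (pvQs 0 0 ds), pvLastR 0 0 ds) := by
    rw [show s.toList.foldl pvStepA ("", 0) = List.foldl pvStepA' ("", 0) ds by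
          rw [hds, List.foldl_map]; rfl,
        h0, pv_foldA_spec ds 0 0 ""]
  -- B's zip-map = the same quotient digits
  have hzip : (((([0, 0] ++ ds) : List Int).zip ((PySem.List.slice ([0, 0] ++ ds) (some 1) none).zip ds)).map
      (fun w => pvWindowQ w.1 w.2.1 w.2.2)) = pvQs 0 0 ds := by
    rw [pv_slice_tail 0 0 ds]
    exact pv_zip_eq ds 0 0
  -- chr(48 + q) = chr(q + 48)
  have hch : (fun q : Int => Char.ofNat (48 + q).toNat) = (fun q : Int => Char.ofNat (q + 48).toNat) := by
    funext q; rw [Int.add_comm]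
  -- A's conditional-append string = B's join-then-lstrip string
  have hstr : List.foldl pvPush "" (pvQs 0 0 ds)
      = String.ofList ((String.ofList ((pvQs 0 0 ds).map (fun q => Char.ofNat (q + 48).toNat))).toList.dropWhile
          (fun c => c == '0')) := by
    apply String.ext
    rw [pv_push_empty (pvQs 0 0 ds) hqb]
    simp
  simp only [hfold, hzip, hch, hstr, pv_lastR_eq ds 0 0]
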